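-- pv_equiv track=rewrite | github.com/GengGeng026/GCal-Notion-Sync | .history/temp_20240625183416.py | format_gradient
-- ===== SOURCE A (Python) =====
-- def format_gradient(text, filled_length, gradient_state, bold_indices=None, less_visible_indices=None):
--     # Assume BRIGHT, DIM, and RESET are defined constants for styling
--     BRIGHT = "\033[1m"
--     DIM = "\033[2m"
--     RESET = "\033[0m"
--     formatted_bar = ""
--     for i, char in enumerate(text):
--         if bold_indices and bold_indices[0] <= i < bold_indices[1]:
--             formatted_bar += f"{BRIGHT}{char}{RESET}"
--         elif less_visible_indices and less_visible_indices[0] <= i < less_visible_indices[1]: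
--             formatted_bar += f"{DIM}{char}{RESET}"
--         else:
--             formatted_bar += char
--     return formatted_bar
-- ===== SOURCE B (Python) =====
-- def format_gradient(text, filled_length, gradient_state, bold_indices=None, less_visible_indices=None):
--     BRIGHT = "\033[1m"
--     DIM = "\033[2m"
--     RESET = "\033[0m"
--     n = len(text)
--     styles = [""] * n
--     if less_visible_indices:
--         lo, hi = less_visible_indices
--         for i in range(max(lo, 0), min(hi, n)):
--             styles[i] = DIM
--     if bold_indices:
--         lo, hi = bold_indices
--         for i in range(max(lo, 0), min(hi, n)):
--             styles[i] = BRIGHT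
--     return "".join(st + ch + RESET if st else ch for st, ch in zip(styles, text))
-- ===== Notes on version B (the rewrite author's own statement) =====
-- stated objective: alternative
-- what changed: Replaces A's single loop with a three-way branch per character by two shaped passes: mark a style table over the clipped dim range then the clipped bold range (bold overwrites, preserving the elif precedence), then render by joining style+char+RESET per index.
import Mathlib
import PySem

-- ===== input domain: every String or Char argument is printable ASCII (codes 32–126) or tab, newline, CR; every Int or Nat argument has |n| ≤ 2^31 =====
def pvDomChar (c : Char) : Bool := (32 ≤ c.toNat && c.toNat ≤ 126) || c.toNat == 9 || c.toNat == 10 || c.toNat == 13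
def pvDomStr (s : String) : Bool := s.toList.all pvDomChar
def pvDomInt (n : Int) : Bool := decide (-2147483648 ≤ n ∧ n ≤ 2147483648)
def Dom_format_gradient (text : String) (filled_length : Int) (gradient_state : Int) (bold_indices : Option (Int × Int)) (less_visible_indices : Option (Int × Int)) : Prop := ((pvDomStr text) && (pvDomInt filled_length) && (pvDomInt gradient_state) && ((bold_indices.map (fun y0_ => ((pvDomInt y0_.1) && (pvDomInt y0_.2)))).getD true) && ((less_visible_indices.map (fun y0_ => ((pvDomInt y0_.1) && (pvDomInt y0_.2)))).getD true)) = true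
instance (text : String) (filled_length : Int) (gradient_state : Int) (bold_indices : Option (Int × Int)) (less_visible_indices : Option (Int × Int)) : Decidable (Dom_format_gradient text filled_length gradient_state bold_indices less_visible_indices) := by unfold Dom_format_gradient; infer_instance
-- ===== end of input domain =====

-- B marks a style table over the clipped index ranges (dim first, bold overwrites), then renders in one
-- joining pass — two shaped passes instead of A's per-character branch chain; objective: alternative decomposition.


-- ===== PORT A =====
-- Literal port of A: one pass over enumerate(text); per character, bold condition, elif dim condition,
-- else plain; string built by appending to an accumulator (as a char list, String.mk at the end).
def format_gradient (text : String) (filled_length : Int) (gradient_state : Int) (bold_indices : Option (Int × Int)) (less_visible_indices : Option (Int × Int)) : String :=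
  let BRIGHT : List Char := "\x1b[1m".toList
  let DIM : List Char := "\x1b[2m".toList
  let RESET : List Char := "\x1b[0m".toList
  String.mk ((PySem.List.enumerate text.toList).foldl (fun acc ic =>
    if (match bold_indices with
        | some p => decide (p.1 ≤ ic.1 ∧ ic.1 < p.2)
        | none => false) then
      acc ++ (BRIGHT ++ [ic.2] ++ RESET)
    else if (match less_visible_indices with
        | some p => decide (p.1 ≤ ic.1 ∧ ic.1 < p.2)
        | none => false) then
      acc ++ (DIM ++ [ic.2] ++ RESET)
    else
      acc ++ [ic.2]) [])

-- ===== PORT B =====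
-- Helper for B: the Python loop 'for i in range(a, b): styles[i] = v'.
def pvSetRange (styles : List (List Char)) (a b : Int) (v : List Char) : List (List Char) :=
  (PySem.List.pyRange a b 1).foldl (fun st i => st.set i.toNat v) styles

def format_gradient_alt (text : String) (filled_length : Int) (gradient_state : Int) (bold_indices : Option (Int × Int)) (less_visible_indices : Option (Int × Int)) : String :=
  let BRIGHT : List Char := "\x1b[1m".toList
  let DIM : List Char := "\x1b[2m".toList
  let RESET : List Char := "\x1b[0m".toList
  let cs := text.toList
  let n : Int := cs.length
  let styles0 : List (List Char) := List.replicate cs.length []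
  let styles1 := match less_visible_indices with
    | none => styles0
    | some p => pvSetRange styles0 (max p.1 0) (min p.2 n) DIM
  let styles2 := match bold_indices with
    | none => styles1
    | some p => pvSetRange styles1 (max p.1 0) (min p.2 n) BRIGHT
  String.mk (((styles2.zip cs).map (fun sc =>
    if sc.1 ≠ [] then sc.1 ++ [sc.2] ++ RESET else [sc.2])).flatten)

-- ===== PRECONDITION & SPEC =====
def Spec_format_gradient (text : String) (filled_length : Int) (gradient_state : Int) (bold_indices : Option (Int × Int)) (less_visible_indices : Option (Int × Int)) (out : String) : Prop := out = format_gradient_alt text filled_length gradient_state bold_indices less_visible_indices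
instance (text : String) (filled_length : Int) (gradient_state : Int) (bold_indices : Option (Int × Int)) (less_visible_indices : Option (Int × Int)) (out : String) : Decidable (Spec_format_gradient text filled_length gradient_state bold_indices less_visible_indices out) := by unfold Spec_format_gradient; infer_instance

-- ===== CLAIM (what is proved, stated in full; the proofs are below) =====
def Claim_equal_format_gradient : Prop := ∀ (text : String) (filled_length : Int) (gradient_state : Int) (bold_indices : Option (Int × Int)) (less_visible_indices : Option (Int × Int)), Dom_format_gradient text filled_length gradient_state bold_indices less_visible_indices → Spec_format_gradient text filled_length gradient_state bold_indices less_visible_indices (format_gradient text filled_length gradient_state bold_indices less_visible_indices)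

-- ===== LEMMAS AND PROOFS =====

-- Truthiness-and-range test 'o and o[0] <= i < o[1]' shared by A's two branches.
def pvCond (o : Option (Int × Int)) (i : Int) : Bool :=
  match o with
  | some p => decide (p.1 ≤ i ∧ i < p.2)
  | none => false

-- The style B's table holds at index i.
def pvStyleOf (bi lv : Option (Int × Int)) (i : Int) : List Char :=
  if pvCond bi i then "\x1b[1m".toList else if pvCond lv i then "\x1b[2m".toList else []

lemma pvSetRange_length (l : List (List Char)) (a b : Int) (v : List Char) :
    (pvSetRange l a b v).length = l.length := by
  unfold pvSetRange
  generalize PySem.List.pyRange a b 1 = r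
  induction r generalizing l with
  | nil => rfl
  | cons x xs ih => simpa using ih (l.set x.toNat v)

lemma pvSetRange_getElem? (l : List (List Char)) (a b : Int) (v : List Char) (j : Nat)
    (ha : 0 ≤ a) :
    (pvSetRange l a b v)[j]? =
      if a ≤ (j : Int) ∧ (j : Int) < b ∧ j < l.length then some v else l[j]? := by
  by_cases hab : b ≤ a
  · rw [pvSetRange, PySem.List.pyRange_one_eq_nil hab]
    simp only [List.foldl_nil]
    have : ¬ (a ≤ (j : Int) ∧ (j : Int) < b ∧ j < l.length) := by omega
    simp [this]
  · push_neg at hab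
    rw [pvSetRange, PySem.List.pyRange_one_cons hab]
    simp only [List.foldl_cons]
    have ih := pvSetRange_getElem? (l.set a.toNat v) (a + 1) b v j (by omega)
    rw [pvSetRange] at ih
    rw [ih]
    rcases Nat.lt_or_ge j l.length with hj | hj
    · by_cases hja : (j : Int) = a
      · have hja' : j = a.toNat := by omega
        have h1 : ¬ (a + 1 ≤ (j : Int) ∧ (j : Int) < b ∧ j < (l.set a.toNat v).length) := by
          simp only [List.length_set]; omega
        have h2 : a ≤ (j : Int) ∧ (j : Int) < b ∧ j < l.length := ⟨by omega, by omega, hj⟩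
        rw [if_neg h1, if_pos h2, hja', List.getElem?_set_self (by omega)]
      · have hne : a.toNat ≠ j := by omega
        rw [List.getElem?_set_ne hne]
        simp only [List.length_set]
        by_cases hcond : a + 1 ≤ (j : Int) ∧ (j : Int) < b
        · have h1 : a + 1 ≤ (j : Int) ∧ (j : Int) < b ∧ j < l.length := ⟨hcond.1, hcond.2, hj⟩
          have h2 : a ≤ (j : Int) ∧ (j : Int) < b ∧ j < l.length := by omega
          rw [if_pos h1, if_pos h2]
        · have h1 : ¬ (a + 1 ≤ (j : Int) ∧ (j : Int) < b ∧ j < l.length) := by omega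
          have h2 : ¬ (a ≤ (j : Int) ∧ (j : Int) < b ∧ j < l.length) := by omega
          rw [if_neg h1, if_neg h2]
    · have hget : (l.set a.toNat v)[j]? = l[j]? := by
        rw [List.getElem?_set]
        split_ifs with hq hr
        · exact absurd hr (by omega)
        · rw [List.getElem?_eq_none (by omega)]
        · rfl
      rw [hget]
      simp only [List.length_set]
      have h1 : ¬ (a + 1 ≤ (j : Int) ∧ (j : Int) < b ∧ j < l.length) := by omega
      have h2 : ¬ (a ≤ (j : Int) ∧ (j : Int) < b ∧ j < l.length) := by omega
      rw [if_neg h1, if_neg h2]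
termination_by (b - a).toNat
decreasing_by omega

-- Rendering pass of B equals A's per-character pieces, given the table holds pvStyleOf.
lemma pvRender_eq (bi lv : Option (Int × Int)) (cs : List Char) (s : Int)
    (st : List (List Char)) (hlen : st.length = cs.length)
    (hst : ∀ k (h : k < st.length), st[k] = pvStyleOf bi lv (s + k)) :
    ((st.zip cs).map (fun sc =>
        if sc.1 ≠ [] then sc.1 ++ [sc.2] ++ "\x1b[0m".toList else [sc.2])).flatten =
    (PySem.List.enumerate cs s).flatMap (fun ic =>
        if pvCond bi ic.1 then "\x1b[1m".toList ++ [ic.2] ++ "\x1b[0m".toList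
        else if pvCond lv ic.1 then "\x1b[2m".toList ++ [ic.2] ++ "\x1b[0m".toList
        else [ic.2]) := by
  induction cs generalizing s st with
  | nil =>
    have : st = [] := List.eq_nil_of_length_eq_zero (by simpa using hlen)
    simp [this, PySem.List.enumerate_nil]
  | cons c cs ih =>
    cases st with
    | nil => simp at hlen
    | cons h st' =>
      have h0 : h = pvStyleOf bi lv s := by simpa using hst 0 (by simp)
      rw [PySem.List.enumerate_cons]
      simp only [List.zip_cons_cons, List.map_cons, List.flatten_cons, List.flatMap_cons]
      have htail := ih (s + 1) st' (by simpa using hlen)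
        (fun k hk => by
          have := hst (k + 1) (by simpa using Nat.succ_lt_succ hk)
          simpa [add_assoc, add_comm, add_left_comm] using this)
      rw [htail]
      congr 1
      rw [h0]
      unfold pvStyleOf
      by_cases hb : pvCond bi s
      · simp [hb]
      · by_cases hl : pvCond lv s
        · simp [hb, hl]
        · simp [hb, hl]

-- The style table B computes, as one expression (definitionally equal to the port's let-chain).
def pvStyles (bi lv : Option (Int × Int)) (cs : List Char) : List (List Char) :=
  let styles0 : List (List Char) := List.replicate cs.length []
  let styles1 := match lv with
    | none => styles0
    | some p => pvSetRange styles0 (max p.1 0) (min p.2 (cs.length : Int)) "\x1b[2m".toList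
  match bi with
  | none => styles1
  | some p => pvSetRange styles1 (max p.1 0) (min p.2 (cs.length : Int)) "\x1b[1m".toList

lemma pvStyles_length (bi lv : Option (Int × Int)) (cs : List Char) :
    (pvStyles bi lv cs).length = cs.length := by
  unfold pvStyles
  cases bi <;> cases lv <;> simp [pvSetRange_length]

lemma pvStyles_getElem? (bi lv : Option (Int × Int)) (cs : List Char) (k : Nat)
    (hk : k < cs.length) :
    (pvStyles bi lv cs)[k]? = some (pvStyleOf bi lv (k : Int)) := by
  have h1 : (match lv with
      | none => List.replicate cs.length ([] : List Char)
      | some p => pvSetRange (List.replicate cs.length []) (max p.1 0) (min p.2 (cs.length : Int)) "\x1b[2m".toList)[k]? =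
      some (if pvCond lv (k : Int) then "\x1b[2m".toList else []) := by
    cases lv with
    | none => simp [pvCond, hk]
    | some p =>
      rw [pvSetRange_getElem? _ _ _ _ _ (by omega)]
      simp only [List.length_replicate, pvCond]
      by_cases hc : p.1 ≤ (k : Int) ∧ (k : Int) < p.2
      · have : max p.1 0 ≤ (k : Int) ∧ (k : Int) < min p.2 (cs.length : Int) ∧ k < cs.length := by omega
        simp [this, hc]
      · have : ¬ (max p.1 0 ≤ (k : Int) ∧ (k : Int) < min p.2 (cs.length : Int) ∧ k < cs.length) := by omega
        simp [hc, List.getElem?_replicate, hk]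
  unfold pvStyles
  simp only []
  cases bi with
  | none => rw [h1]; simp [pvStyleOf, pvCond]
  | some p =>
    rw [pvSetRange_getElem? _ _ _ _ _ (by omega)]
    have hlen1 : (match lv with
        | none => List.replicate cs.length ([] : List Char)
        | some p => pvSetRange (List.replicate cs.length []) (max p.1 0) (min p.2 (cs.length : Int)) "\x1b[2m".toList).length = cs.length := by
      cases lv <;> simp [pvSetRange_length]
    rw [hlen1]
    by_cases hc : p.1 ≤ (k : Int) ∧ (k : Int) < p.2
    · have hcc : max p.1 0 ≤ (k : Int) ∧ (k : Int) < min p.2 (cs.length : Int) ∧ k < cs.length := by omega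
      simp [hcc, pvStyleOf, pvCond, hc]
    · have hcc : ¬ (max p.1 0 ≤ (k : Int) ∧ (k : Int) < min p.2 (cs.length : Int) ∧ k < cs.length) := by omega
      rw [if_neg hcc, h1]
      simp only [pvStyleOf, pvCond]
      have : ¬ (p.1 ≤ (k : Int) ∧ (k : Int) < p.2) := hc
      simp [this]

-- ===== VERDICT (by name: the statement is the Claim_ definition above) =====
theorem format_gradient_spec : Claim_equal_format_gradient := by
  intro text filled_length gradient_state bi lv _
  unfold Spec_format_gradient
  have ha : format_gradient text filled_length gradient_state bi lv =
      String.mk ((PySem.List.enumerate text.toList).foldl (fun acc ic =>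
        if (match bi with | some p => decide (p.1 ≤ ic.1 ∧ ic.1 < p.2) | none => false) then
          acc ++ ("\x1b[1m".toList ++ [ic.2] ++ "\x1b[0m".toList)
        else if (match lv with | some p => decide (p.1 ≤ ic.1 ∧ ic.1 < p.2) | none => false) then
          acc ++ ("\x1b[2m".toList ++ [ic.2] ++ "\x1b[0m".toList)
        else acc ++ [ic.2]) []) := rfl
  have hb : format_gradient_alt text filled_length gradient_state bi lv =
      String.mk ((((pvStyles bi lv text.toList).zip text.toList).map (fun sc =>
        if sc.1 ≠ [] then sc.1 ++ [sc.2] ++ "\x1b[0m".toList else [sc.2])).flatten) := rfl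
  rw [ha, hb]
  congr 1
  have hfm := PySem.List.foldl_append_eq_flatMap
    (g := fun ic : Int × Char =>
      if pvCond bi ic.1 then "\x1b[1m".toList ++ [ic.2] ++ "\x1b[0m".toList
      else if pvCond lv ic.1 then "\x1b[2m".toList ++ [ic.2] ++ "\x1b[0m".toList
      else [ic.2]) (l := PySem.List.enumerate text.toList) (acc := [])
  have hc := PySem.List.foldl_congr_mem (l := PySem.List.enumerate text.toList)
    (init := ([] : List Char))
    (f := fun acc (ic : Int × Char) =>
      if (match bi with | some p => decide (p.1 ≤ ic.1 ∧ ic.1 < p.2) | none => false) then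
        acc ++ ("\x1b[1m".toList ++ [ic.2] ++ "\x1b[0m".toList)
      else if (match lv with | some p => decide (p.1 ≤ ic.1 ∧ ic.1 < p.2) | none => false) then
        acc ++ ("\x1b[2m".toList ++ [ic.2] ++ "\x1b[0m".toList)
      else acc ++ [ic.2])
    (g := fun acc ic =>
      acc ++ (if pvCond bi ic.1 then "\x1b[1m".toList ++ [ic.2] ++ "\x1b[0m".toList
        else if pvCond lv ic.1 then "\x1b[2m".toList ++ [ic.2] ++ "\x1b[0m".toList
        else [ic.2]))
    (by intro acc ic _
        simp only [pvCond]
        split_ifs <;> rfl)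
  rw [hc, hfm, List.nil_append]
  refine (pvRender_eq bi lv text.toList 0 (pvStyles bi lv text.toList)
    (pvStyles_length bi lv text.toList) ?_).symm
  intro k hk
  have hk' : k < text.toList.length := by rw [pvStyles_length] at hk; exact hk
  have hg := pvStyles_getElem? bi lv text.toList k hk'
  rw [List.getElem?_eq_getElem hk] at hg
  have := Option.some.inj hg
  rw [this, zero_add]
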